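-- pv_equiv track=rewrite | github.com/marinelay/TypeT5 | src/spot/utils.py | cumulative_counts
-- ===== SOURCE A (Python) =====
-- from collections import Counter
-- from typing import (
--     Any,
--     Callable,
--     Generator,
--     Generic,
--     Iterable,
--     NamedTuple,
--     Optional,
--     Sequence,
--     TypeVar,
--     Union,
--     cast,
-- )
--
-- def cumulative_counts(elems: Sequence[int]) -> tuple[list[int], list[int]]:
--     counts = Counter(elems)
--     keys = sorted(counts.keys())
--     n = 0
--     ys = []
--     for k in keys:
--         n += counts[k]
--         ys.append(n)
--     return keys, ys
-- ===== SOURCE B (Python) =====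
-- def cumulative_counts(elems):
--     s = sorted(elems)
--     keys = []
--     ys = []
--     for i, v in enumerate(s):
--         if i + 1 == len(s) or s[i + 1] != v:
--             keys.append(v)
--             ys.append(i + 1)
--     return keys, ys
-- ===== Notes on version B (the rewrite author's own statement) =====
-- stated objective: alternative
-- what changed: Instead of building a Counter, sorting its keys and accumulating counts in a second loop, B sorts the whole sequence once and does a single grouping scan: at the end of each run of equal values the position reached in the sorted list IS the cumulative count.
import Mathlib
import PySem

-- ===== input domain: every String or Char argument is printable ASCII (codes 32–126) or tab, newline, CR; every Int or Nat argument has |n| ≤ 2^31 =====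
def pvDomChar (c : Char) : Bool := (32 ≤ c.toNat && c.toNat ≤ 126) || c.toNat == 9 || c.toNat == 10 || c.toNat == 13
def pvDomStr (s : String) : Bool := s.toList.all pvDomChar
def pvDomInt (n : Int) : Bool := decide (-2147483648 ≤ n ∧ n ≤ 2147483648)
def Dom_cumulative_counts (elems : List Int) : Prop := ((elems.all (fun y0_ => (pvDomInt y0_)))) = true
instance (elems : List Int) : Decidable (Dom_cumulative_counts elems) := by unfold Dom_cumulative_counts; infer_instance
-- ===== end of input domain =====

-- B sorts the whole sequence once and reads each cumulative count off the position where a run of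
-- equal values ends, in one grouping scan — instead of A's Counter, key sort and accumulation loop.

-- ===== PORT A =====
def cumulative_counts (elems : List Int) : List Int × List Int :=
  let counts := PySem.Dict.counter elems
  let keys := PySem.List.sorted counts.keys (fun x => x) false
  let r := keys.foldl (fun (acc : Int × List Int) k =>
      (acc.1 + counts.getD k 0, acc.2 ++ [acc.1 + counts.getD k 0])) (0, [])
  (keys, r.2)

-- ===== PORT B =====
def cumulative_counts_alt (elems : List Int) : List Int × List Int :=
  let s := PySem.List.sorted elems (fun x => x) false
  (PySem.List.enumerate s 0).foldl
    (fun (acc : List Int × List Int) iv =>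
      if iv.1 + 1 = (s.length : Int) ∨ ¬ (PySem.List.pyGet? s (iv.1 + 1) = some iv.2) then
        (acc.1 ++ [iv.2], acc.2 ++ [iv.1 + 1])
      else acc)
    ([], [])

-- ===== PRECONDITION & SPEC =====
def Spec_cumulative_counts (elems : List Int) (out : List Int × List Int) : Prop := out = cumulative_counts_alt elems
instance (elems : List Int) (out : List Int × List Int) : Decidable (Spec_cumulative_counts elems out) := by unfold Spec_cumulative_counts; infer_instance

-- ===== CLAIM (what is proved, stated in full; the proofs are below) =====
def Claim_equal_cumulative_counts : Prop := ∀ (elems : List Int), Dom_cumulative_counts elems → Spec_cumulative_counts elems (cumulative_counts elems)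

-- ===== LEMMAS AND PROOFS =====

/-- Reference recursion: one grouping scan over a list with a position counter `c`
(number of elements already consumed). -/
def pvRef : List Int → Int → List Int × List Int
  | [], _ => ([], [])
  | a :: t, c =>
    if t.head? = some a then pvRef t (c + 1)
    else (a :: (pvRef t (c + 1)).1, (c + 1) :: (pvRef t (c + 1)).2)

lemma pv_not_mem (a : Int) (t : List Int) (hp : (a :: t).Pairwise (· ≤ ·))
    (h : ¬ (t.head? = some a)) : a ∉ t := by
  rcases List.pairwise_cons.mp hp with ⟨ha, ht⟩
  cases t with
  | nil => simp
  | cons b t' =>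
    intro hmem
    rcases List.pairwise_cons.mp ht with ⟨hb, _⟩
    rcases List.mem_cons.mp hmem with hab | hmem'
    · exact h (by simp [hab])
    · have h1 : a ≤ b := ha b (by simp)
      have h2 : b ≤ a := hb a hmem'
      exact h (by simp [le_antisymm h2 h1])

lemma pv_dedup_cons_head (a : Int) (t : List Int) :
    PySem.List.dedup (a :: a :: t) = PySem.List.dedup (a :: t) := by
  simp only [PySem.List.dedup_eq_ofList, PySem.Set.ofList_cons, PySem.Set.discard]
  simp [List.filter_filter]

lemma pv_dedup_cons_not_mem (a : Int) (t : List Int) (h : a ∉ t) :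
    PySem.List.dedup (a :: t) = a :: PySem.List.dedup t := by
  simp only [PySem.List.dedup_eq_ofList, PySem.Set.ofList_cons, PySem.Set.discard]
  congr 1
  apply List.filter_eq_self.mpr
  intro y hy
  have hyt : y ∈ t := (PySem.Set.mem_ofList t y).mp hy
  have : ¬ (y = a) := fun e => h (e ▸ hyt)
  simp [this]

lemma pv_dedup_pairwise (s : List Int) (hp : s.Pairwise (· ≤ ·)) :
    (PySem.List.dedup s).Pairwise (· < ·) := by
  induction s with
  | nil => simp [PySem.List.dedup_eq_ofList, PySem.Set.ofList]
  | cons a t ih =>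
    rcases List.pairwise_cons.mp hp with ⟨ha, ht⟩
    by_cases hh : t.head? = some a
    · cases t with
      | nil => simp at hh
      | cons b t' =>
        have hab : b = a := by simpa using hh
        subst hab
        rw [pv_dedup_cons_head]
        exact ih ht
    · have hnm : a ∉ t := pv_not_mem a t hp hh
      rw [pv_dedup_cons_not_mem a t hnm]
      refine List.pairwise_cons.mpr ⟨?_, ih ht⟩
      intro y hy
      have hyt : y ∈ t := (PySem.List.mem_dedup t y).mp hy
      exact lt_of_le_of_ne (ha y hyt) (fun e => hnm (e ▸ hyt))

lemma pv_ref_spec (s : List Int) (hp : s.Pairwise (· ≤ ·)) (c : Int) :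
    pvRef s c = (PySem.List.dedup s,
      (PySem.List.dedup s).map (fun k => c + (s.countP (fun x => decide (x ≤ k)) : Int))) := by
  induction s generalizing c with
  | nil => simp [pvRef, PySem.List.dedup_eq_ofList, PySem.Set.ofList]
  | cons a t ih =>
    rcases List.pairwise_cons.mp hp with ⟨ha, ht⟩
    by_cases hh : t.head? = some a
    · cases t with
      | nil => simp at hh
      | cons b t' =>
        have hab : a = b := by have : b = a := by simpa using hh
                               exact this.symm
        subst hab
        rw [show pvRef (a :: a :: t') c = pvRef (a :: t') (c + 1) by simp [pvRef]]
        rw [ih ht (c + 1), pv_dedup_cons_head]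
        refine Prod.ext rfl ?_
        apply List.map_congr_left
        intro k hk
        have hkt : k ∈ a :: t' := (PySem.List.mem_dedup _ k).mp hk
        have hak : a ≤ k := by
          rcases List.mem_cons.mp hkt with e | hkt'
          · exact le_of_eq e.symm
          · exact ha k (List.mem_cons.mpr (Or.inr hkt'))
        simp only [List.countP_cons, decide_eq_true_eq, hak, if_pos]
        push_cast
        ring
    · have hnm : a ∉ t := pv_not_mem a t hp hh
      rw [show pvRef (a :: t) c
            = (a :: (pvRef t (c + 1)).1, (c + 1) :: (pvRef t (c + 1)).2) by
          simp [pvRef, hh]]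
      rw [ih ht (c + 1), pv_dedup_cons_not_mem a t hnm]
      refine Prod.ext rfl ?_
      simp only [List.map_cons]
      have h0 : t.countP (fun x => decide (x ≤ a)) = 0 := by
        apply List.countP_eq_zero.mpr
        intro x hx
        simp only [decide_eq_true_eq]
        intro hxa
        exact hnm (le_antisymm hxa (ha x hx) ▸ hx)
      refine List.cons_eq_cons.mpr ⟨?_, ?_⟩
      · simp [h0]
      · apply List.map_congr_left
        intro k hk
        have hkt : k ∈ t := (PySem.List.mem_dedup t k).mp hk
        have hak : a ≤ k := ha k hkt
        simp only [List.countP_cons, decide_eq_true_eq, hak, if_pos]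
        push_cast
        ring

lemma pv_fold_enum (t : List Int) : ∀ (pre : List Int) (acc : List Int × List Int),
    (PySem.List.enumerate t (pre.length : Int)).foldl
      (fun (acc : List Int × List Int) iv =>
        if iv.1 + 1 = (((pre ++ t).length : Nat) : Int) ∨
            ¬ (PySem.List.pyGet? (pre ++ t) (iv.1 + 1) = some iv.2) then
          (acc.1 ++ [iv.2], acc.2 ++ [iv.1 + 1])
        else acc) acc
    = (acc.1 ++ (pvRef t (pre.length : Int)).1, acc.2 ++ (pvRef t (pre.length : Int)).2) := by
  induction t with
  | nil => intro pre acc; simp [PySem.List.enumerate_nil, pvRef]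
  | cons a t' ih =>
    intro pre acc
    rw [PySem.List.enumerate_cons, List.foldl_cons]
    have hget : PySem.List.pyGet? (pre ++ a :: t') ((pre.length : Int) + 1) = t'.head? := by
      have h1 : ((pre.length : Int) + 1) = ((pre.length + 1 : Nat) : Int) := by push_cast; ring
      rw [h1, PySem.List.pyGet?_natCast]
      rw [show pre ++ a :: t' = (pre ++ [a]) ++ t' by simp]
      rw [List.getElem?_append_right (by simp)]
      simp [List.head?_eq_getElem?]
    have hcond : ((pre.length : Int) + 1 = (((pre ++ a :: t').length : Nat) : Int) ∨
        ¬ (PySem.List.pyGet? (pre ++ a :: t') ((pre.length : Int) + 1) = some a))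
        ↔ ¬ (t'.head? = some a) := by
      rw [hget]
      constructor
      · rintro (hlen | hne)
        · have hlen' : pre.length + 1 = (pre ++ a :: t').length := by exact_mod_cast hlen
          have h2 : (pre ++ a :: t').length = pre.length + t'.length + 1 := by
            simp [List.length_append]
            omega
          have : t'.length = 0 := by omega
          have : t' = [] := List.eq_nil_of_length_eq_zero this
          subst this; simp
        · exact hne
      · intro hne; exact Or.inr hne
    have hstep : ∀ (acc2 : List Int × List Int),
        (PySem.List.enumerate t' ((pre.length : Int) + 1)).foldl
          (fun (acc : List Int × List Int) iv =>
            if iv.1 + 1 = (((pre ++ a :: t').length : Nat) : Int) ∨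
                ¬ (PySem.List.pyGet? (pre ++ a :: t') (iv.1 + 1) = some iv.2) then
              (acc.1 ++ [iv.2], acc.2 ++ [iv.1 + 1])
            else acc) acc2
        = (acc2.1 ++ (pvRef t' ((pre.length : Int) + 1)).1,
           acc2.2 ++ (pvRef t' ((pre.length : Int) + 1)).2) := by
      intro acc2
      have := ih (pre ++ [a]) acc2
      simp only [List.length_append, List.length_cons, List.length_nil] at this ⊢
      rw [show (pre ++ [a]) ++ t' = pre ++ a :: t' by simp] at this
      rw [show ((pre.length + 1 : Nat) : Int) = (pre.length : Int) + 1 by push_cast; rfl] at this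
      convert this using 3
      push_cast
      ring_nf
    by_cases hh : t'.head? = some a
    · rw [if_neg (by rw [hcond]; simp [hh])]
      rw [hstep acc]
      rw [show pvRef (a :: t') (pre.length : Int) = pvRef t' ((pre.length : Int) + 1) by
        simp [pvRef, hh]]
    · rw [if_pos (hcond.mpr hh)]
      rw [hstep (acc.1 ++ [a], acc.2 ++ [(pre.length : Int) + 1])]
      rw [show pvRef (a :: t') (pre.length : Int)
            = (a :: (pvRef t' ((pre.length : Int) + 1)).1,
               ((pre.length : Int) + 1) :: (pvRef t' ((pre.length : Int) + 1)).2) by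
        simp [pvRef, hh]]
      simp

lemma pv_count_length (l : List Int) (k : Int) :
    l.length = l.count k + (l.filter (fun x => !(x == k))).length := by
  induction l with
  | nil => simp
  | cons x l ih =>
    by_cases hx : x = k
    · subst hx; simp [ih]; omega
    · simp [hx]; omega

lemma pv_count_split (l : List Int) (k k' : Int) (h : k ≤ k') :
    l.countP (fun x => decide (x ≤ k'))
      = l.count k + (l.filter (fun x => !(x == k))).countP (fun x => decide (x ≤ k')) := by
  induction l with
  | nil => simp
  | cons x l ih =>
    by_cases hx : x = k
    · subst hx
      simp [h, ih]
      omega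
    · by_cases hx' : x ≤ k'
      · simp [List.countP_cons, hx]
        omega
      · simp [hx, hx', ih]

lemma pv_sum_fold (K : List Int) : ∀ (elems : List Int) (c : Int) (ys : List Int),
    K.Pairwise (· < ·) → (∀ x ∈ elems, x ∈ K) →
    K.foldl (fun (acc : Int × List Int) k =>
        (acc.1 + ((elems.count k : Nat) : Int), acc.2 ++ [acc.1 + ((elems.count k : Nat) : Int)])) (c, ys)
    = (c + ((elems.length : Nat) : Int), ys ++ K.map (fun k => c + (elems.countP (fun x => decide (x ≤ k)) : Int))) := by
  induction K with
  | nil =>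
    intro elems c ys _ hcov
    have : elems = [] := by
      cases elems with
      | nil => rfl
      | cons x l => exact absurd (hcov x (by simp)) (by simp)
    subst this
    simp
  | cons k K' ih =>
    intro elems c ys hp hcov
    rcases List.pairwise_cons.mp hp with ⟨hk, hp'⟩
    rw [List.foldl_cons]
    have hfun :
        K'.foldl (fun (acc : Int × List Int) k' =>
            (acc.1 + ((elems.count k' : Nat) : Int),
             acc.2 ++ [acc.1 + ((elems.count k' : Nat) : Int)]))
          (c + ((elems.count k : Nat) : Int), ys ++ [c + ((elems.count k : Nat) : Int)])
        = K'.foldl (fun (acc : Int × List Int) k' =>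
            (acc.1 + (((elems.filter (fun x => !(x == k))).count k' : Nat) : Int),
             acc.2 ++ [acc.1 + (((elems.filter (fun x => !(x == k))).count k' : Nat) : Int)]))
          (c + ((elems.count k : Nat) : Int), ys ++ [c + ((elems.count k : Nat) : Int)]) := by
      apply PySem.List.foldl_congr_mem
      intro acc k' hk'
      have hne : ¬ (k' = k) := fun e => absurd (e ▸ hk k' hk') (lt_irrefl k)
      rw [List.count_filter (by simp [hne])]
    rw [hfun, ih (elems.filter (fun x => !(x == k))) (c + ((elems.count k : Nat) : Int))
          (ys ++ [c + ((elems.count k : Nat) : Int)]) hp' ?hcov']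
    case hcov' =>
      intro x hx
      rcases List.mem_filter.mp hx with ⟨hxe, hxk⟩
      rcases List.mem_cons.mp (hcov x hxe) with e | hK'
      · simp [e] at hxk
      · exact hK'
    refine Prod.ext ?_ ?_
    · show c + ((elems.count k : Nat) : Int) + _ = c + _
      have := pv_count_length elems k
      push_cast [this]
      ring
    · show ys ++ [c + ((elems.count k : Nat) : Int)] ++ _ = ys ++ _
      rw [List.map_cons, List.append_assoc]
      congr 1
      have hhead : elems.countP (fun x => decide (x ≤ k)) = elems.count k := by
        rw [List.count_eq_countP]
        apply List.countP_congr
        intro x hxe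
        rcases List.mem_cons.mp (hcov x hxe) with e | hK'
        · simp [e]
        · have : k < x := hk x hK'
          simp only [decide_eq_true_eq, beq_iff_eq]
          constructor
          · intro hxk; exact absurd (lt_of_lt_of_le this hxk) (lt_irrefl k)
          · intro e; exact absurd (e ▸ this) (lt_irrefl k)
      rw [List.singleton_append]
      refine List.cons_eq_cons.mpr ⟨by rw [hhead], ?_⟩
      apply List.map_congr_left
      intro k' hk'
      have hsplit := pv_count_split elems k k' (le_of_lt (hk k' hk'))
      push_cast [hsplit]
      ring

-- ===== VERDICT (by name: the statement is the Claim_ definition above) =====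
theorem cumulative_counts_spec : Claim_equal_cumulative_counts := by
  intro elems _
  unfold Spec_cumulative_counts
  show cumulative_counts elems = cumulative_counts_alt elems
  simp only [cumulative_counts, cumulative_counts_alt,
    PySem.Dict.keys_counter, PySem.Dict.getD_counter]
  have hsp : (PySem.List.sorted elems (fun x => x) false).Pairwise (· ≤ ·) := by
    simpa using PySem.List.sorted_pairwise elems (fun x => x)
  have hKp : (PySem.List.sorted (PySem.Set.ofList elems) (fun x => x) false).Pairwise (· < ·) := by
    simpa using PySem.List.sorted_ofList_pairwise_lt elems
  have hcov : ∀ x ∈ elems, x ∈ PySem.List.sorted (PySem.Set.ofList elems) (fun x => x) false := by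
    intro x hx
    rw [PySem.List.mem_sorted]
    exact (PySem.Set.mem_ofList elems x).mpr hx
  rw [pv_sum_fold _ elems 0 [] hKp hcov]
  have hB := pv_fold_enum (PySem.List.sorted elems (fun x => x) false) [] ([], [])
  simp only [List.nil_append, List.length_nil, Nat.cast_zero] at hB
  refine Eq.trans ?_ hB.symm
  rw [pv_ref_spec _ hsp 0]
  have hK : PySem.List.sorted (PySem.Set.ofList elems) (fun x => x) false
      = PySem.List.dedup (PySem.List.sorted elems (fun x => x) false) := by
    apply PySem.List.sorted_eq_of_perm_of_pairwise_lt
    · apply (List.perm_ext_iff_of_nodup ?_ ?_).mpr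
      · intro x
        rw [PySem.List.mem_dedup, PySem.List.mem_sorted, PySem.Set.mem_ofList]
      · rw [PySem.List.dedup_eq_ofList]; exact PySem.Set.nodup_ofList _
      · exact PySem.Set.nodup_ofList elems
    · simpa using pv_dedup_pairwise _ hsp
  rw [hK]
  refine Prod.ext rfl ?_
  simp only [List.nil_append]
  apply List.map_congr_left
  intro k _
  rw [(PySem.List.sorted_perm elems (fun x => x) false).countP_eq]
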